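-- pv_equiv track=rewrite | github.com/Felipe34515/Recursos-Introduci-n-a-la-programaci-n- | Labs/N3_L3-Ciclos con while y for/N3-Lab_3-f.rueda4.py | buscar_elementos_iguales_seguidos
-- ===== SOURCE A (Python) =====
-- def buscar_elementos_iguales_seguidos(lista:list)-> int:
--     b = 0
--     rta = -1
--     for i in lista:
--         if b < len(lista)-1:
--             b += 1
--             if lista.count (i) <= 2 and lista[lista.index(i)] == lista[lista.index(i)+1]:
--                 rta = i
--
--     return rta
-- ===== SOURCE B (Python) =====
-- def buscar_elementos_iguales_seguidos(lista: list) -> int: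
--     # One pass to count every value, then scan adjacent pairs from the end:
--     # the answer is the value of the latest adjacent equal pair whose value
--     # occurs exactly twice in the list; -1 if there is none.
--     counts = {}
--     for x in lista:
--         counts[x] = counts.get(x, 0) + 1
--     for k in range(len(lista) - 2, -1, -1):
--         if lista[k] == lista[k + 1] and counts[lista[k]] == 2:
--             return lista[k]
--     return -1
-- ===== Notes on version B (the rewrite author's own statement) =====
-- stated objective: faster
-- what changed: A rescans the whole list with count() and index() for every element inside its loop; B counts all values once into a dict and then scans adjacent index pairs backwards, returning at the first pair whose value occurs exactly twice.
import Mathlib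
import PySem

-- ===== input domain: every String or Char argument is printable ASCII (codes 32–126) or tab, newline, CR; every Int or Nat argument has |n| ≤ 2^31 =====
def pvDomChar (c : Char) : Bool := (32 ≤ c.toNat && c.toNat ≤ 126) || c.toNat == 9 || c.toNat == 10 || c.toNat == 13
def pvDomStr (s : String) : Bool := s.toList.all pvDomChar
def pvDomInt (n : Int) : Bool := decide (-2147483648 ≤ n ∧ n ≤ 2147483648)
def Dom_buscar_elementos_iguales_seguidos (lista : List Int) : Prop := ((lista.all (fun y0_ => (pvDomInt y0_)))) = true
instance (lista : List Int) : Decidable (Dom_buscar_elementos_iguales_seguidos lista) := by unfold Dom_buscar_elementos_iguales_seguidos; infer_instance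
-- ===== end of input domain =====

-- B replaces A's per-element count()/index() rescans by one counting pass plus a
-- backward scan over adjacent index pairs (O(n) instead of O(n^2)); proved equal on all inputs.


-- ===== PORT A =====
-- the inner 'if' condition of A: lista.count(i) <= 2 and lista[lista.index(i)] == lista[lista.index(i)+1]
def pvCondA (lista : List Int) (i : Int) : Bool :=
  decide (PySem.List.count lista i ≤ 2) &&
    (PySem.List.pyGet? lista (((PySem.List.index? lista i).getD 0 : Nat) : Int) ==
     PySem.List.pyGet? lista ((((PySem.List.index? lista i).getD 0 : Nat) : Int) + 1))

def buscar_elementos_iguales_seguidos (lista : List Int) : Int :=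
  (lista.foldl (fun (st : Int × Int) (i : Int) =>
      if st.1 < (lista.length : Int) - 1 then
        if pvCondA lista i then (st.1 + 1, i) else (st.1 + 1, st.2)
      else st)
    ((0 : Int), (-1 : Int))).2

-- ===== PORT B =====
-- the backward 'for k in range(len(lista)-2, -1, -1)' loop of B, called with k = len-2
def pvAltScan (lista : List Int) (counts : PySem.Dict Int Int) : Nat → Int
  | 0 =>
    if (lista.getD 0 0 == lista.getD 1 0) && (counts.getD (lista.getD 0 0) 0 == 2) then
      lista.getD 0 0
    else -1
  | k + 1 =>
    if (lista.getD (k + 1) 0 == lista.getD (k + 2) 0) && (counts.getD (lista.getD (k + 1) 0) 0 == 2) then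
      lista.getD (k + 1) 0
    else pvAltScan lista counts k

def buscar_elementos_iguales_seguidos_alt (lista : List Int) : Int :=
  let counts := lista.foldl (fun (d : PySem.Dict Int Int) x => d.insert x (d.getD x 0 + 1)) PySem.Dict.empty
  if 2 ≤ lista.length then pvAltScan lista counts (lista.length - 2) else -1

-- ===== PRECONDITION & SPEC =====
def Spec_buscar_elementos_iguales_seguidos (lista : List Int) (out : Int) : Prop := out = buscar_elementos_iguales_seguidos_alt lista
instance (lista : List Int) (out : Int) : Decidable (Spec_buscar_elementos_iguales_seguidos lista out) := by unfold Spec_buscar_elementos_iguales_seguidos; infer_instance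

-- ===== CLAIM (what is proved, stated in full; the proofs are below) =====
def Claim_equal_buscar_elementos_iguales_seguidos : Prop := ∀ (lista : List Int), Dom_buscar_elementos_iguales_seguidos lista → Spec_buscar_elementos_iguales_seguidos lista (buscar_elementos_iguales_seguidos lista)

-- ===== LEMMAS AND PROOFS =====

-- index-level predicates used to align the two scans
def pvPredA (l : List Int) (k : Nat) : Bool := pvCondA l (l.getD k 0)
def pvPredB (l : List Int) (k : Nat) : Bool :=
  (l.getD k 0 == l.getD (k + 1) 0) && ((List.count (l.getD k 0) l : Int) == 2)

-- an abstract backward index scan (value at first index satisfying p, going k, k-1, …, 0)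
def pvScan (l : List Int) (p : Nat → Bool) : Nat → Int
  | 0 => if p 0 then l.getD 0 0 else -1
  | k + 1 => if p (k + 1) then l.getD (k + 1) 0 else pvScan l p k

-- two distinct occurrences give count ≥ 2; three give count ≥ 3
lemma pv_count_ge_two (l : List Int) (v : Int) (i j : Nat) (hij : i < j) (hj : j < l.length)
    (hi : l[i]'(by omega) = v) (hjv : l[j] = v) : 2 ≤ List.count v l := by
  have hmem : v ∈ l.drop (i + 1) := by
    refine List.mem_iff_getElem.mpr ⟨j - (i + 1), by simp; omega, ?_⟩
    rw [List.getElem_drop]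
    simp only [show i + 1 + (j - (i + 1)) = j from by omega]
    exact hjv
  have c1 : 0 < List.count v (l.drop (i + 1)) := List.count_pos_iff.mpr hmem
  have hc : List.count v l = List.count v (l.take i) + List.count v (l.drop i) := by
    conv_lhs => rw [← List.take_append_drop i l]
    rw [List.count_append]
  rw [List.drop_eq_getElem_cons (by omega : i < l.length), List.count_cons] at hc
  simp [hi] at hc
  omega

lemma pv_count_ge_three (l : List Int) (v : Int) (i j k : Nat) (hij : i < j) (hjk : j < k)
    (hk : k < l.length) (hi : l[i]'(by omega) = v) (hjv : l[j]'(by omega) = v) (hkv : l[k] = v) :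
    3 ≤ List.count v l := by
  have h2 : 2 ≤ List.count v (l.drop (i + 1)) := by
    refine pv_count_ge_two (l.drop (i + 1)) v (j - (i + 1)) (k - (i + 1)) (by omega)
      (by simp; omega) ?_ ?_
    · rw [List.getElem_drop]
      simp only [show i + 1 + (j - (i + 1)) = j from by omega]
      exact hjv
    · rw [List.getElem_drop]
      simp only [show i + 1 + (k - (i + 1)) = k from by omega]
      exact hkv
  have hc : List.count v l = List.count v (l.take i) + List.count v (l.drop i) := by
    conv_lhs => rw [← List.take_append_drop i l]
    rw [List.count_append]
  rw [List.drop_eq_getElem_cons (by omega : i < l.length), List.count_cons] at hc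
  simp [hi] at hc
  omega

-- characterization of pvCondA at a valid position
lemma pv_condA_iff (l : List Int) (j : Nat) (hj : j < l.length) :
    pvCondA l (l[j]) = true ↔
      ∃ f : Nat, PySem.List.index? l (l[j]) = some f ∧
        List.count (l[j]) l ≤ 2 ∧ ∃ (hf : f + 1 < l.length), l[f]'(by omega) = l[j] ∧ l[f+1]'hf = l[j] := by
  obtain ⟨f, hf⟩ : ∃ f, PySem.List.index? l (l[j]) = some f :=
    Option.isSome_iff_exists.mp ((PySem.List.index?_isSome_iff l (l[j])).mpr (l.getElem_mem hj))
  obtain ⟨hflt, hfval, -⟩ := PySem.List.getElem_of_index?_eq_some hf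
  unfold pvCondA
  rw [PySem.List.count_eq]
  simp only [hf, Option.getD_some]
  rw [show ((f : Int) + 1) = (((f + 1 : Nat)) : Int) from by push_cast; ring]
  rw [PySem.List.pyGet?_natCast, PySem.List.pyGet?_natCast]
  rw [List.getElem?_eq_getElem hflt, hfval]
  constructor
  · intro h
    simp only [Bool.and_eq_true, decide_eq_true_eq, beq_iff_eq] at h
    obtain ⟨hcnt, hget⟩ := h
    obtain ⟨hlt1, heq1⟩ := List.getElem?_eq_some_iff.mp hget.symm
    exact ⟨f, rfl, hcnt, hlt1, hfval, heq1⟩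
  · rintro ⟨f', hf', hcnt, hlt1, -, heq1⟩
    injection hf' with hff; subst hff
    simp only [Bool.and_eq_true, decide_eq_true_eq, beq_iff_eq]
    refine ⟨hcnt, ?_⟩
    rw [List.getElem?_eq_getElem hlt1, heq1]


lemma pv_fact_i (l : List Int) (k : Nat) (hk : k + 1 < l.length) (h : pvPredB l k = true) :
    pvPredA l k = true := by
  have hklt : k < l.length := by omega
  unfold pvPredB at h
  rw [List.getD_eq_getElem l 0 hklt, List.getD_eq_getElem l 0 hk] at h
  simp only [Bool.and_eq_true, beq_iff_eq] at h
  obtain ⟨heq, hcntI⟩ := h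
  have hcnt : List.count (l[k]'hklt) l = 2 := by exact_mod_cast hcntI
  unfold pvPredA
  rw [List.getD_eq_getElem l 0 hklt]
  rw [pv_condA_iff l k hklt]
  obtain ⟨f, hf⟩ : ∃ f, PySem.List.index? l (l[k]'hklt) = some f :=
    Option.isSome_iff_exists.mp ((PySem.List.index?_isSome_iff l _).mpr (l.getElem_mem hklt))
  obtain ⟨hflt, hfval, hmin⟩ := PySem.List.getElem_of_index?_eq_some hf
  have hfk : f = k := by
    rcases lt_trichotomy f k with hlt | heqq | hgt
    · exfalso
      have h3 : 3 ≤ List.count (l[k]'hklt) l :=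
        pv_count_ge_three l _ f k (k+1) hlt (by omega) hk hfval rfl heq.symm
      omega
    · exact heqq
    · exact absurd rfl (hmin k hgt)
  subst hfk
  exact ⟨f, hf, by omega, hk, hfval, heq.symm⟩

lemma pv_fact_ii (l : List Int) (j : Nat) (hj : j + 1 < l.length) (h : pvPredA l j = true) :
    pvPredB l j = true ∨ (∃ j', j = j' + 1 ∧ pvPredB l j' = true ∧ l.getD j' 0 = l.getD j 0) := by
  have hjlt : j < l.length := by omega
  unfold pvPredA at h
  rw [List.getD_eq_getElem l 0 hjlt] at h
  rw [pv_condA_iff l j hjlt] at h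
  obtain ⟨f, hf, hcnt, hf1, hfv, hf1v⟩ := h
  obtain ⟨hflt, -, hmin⟩ := PySem.List.getElem_of_index?_eq_some hf
  have hcnt2 : List.count (l[j]'hjlt) l = 2 := by
    have := pv_count_ge_two l _ f (f+1) (by omega) hf1 hfv hf1v
    omega
  have hfj : f ≤ j := by
    by_contra hgt
    exact hmin j (by omega) rfl
  have hjf1 : j ≤ f + 1 := by
    by_contra hgt
    have h3 : 3 ≤ List.count (l[j]'hjlt) l :=
      pv_count_ge_three l _ f (f+1) j (by omega) (by omega) hjlt hfv hf1v rfl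
    omega
  rcases Nat.eq_or_lt_of_le hjf1 with hje | hjlt2
  · -- j = f + 1 : the pair sits at (j-1, j)
    right
    refine ⟨f, hje, ?_, ?_⟩
    · unfold pvPredB
      rw [List.getD_eq_getElem l 0 hflt, List.getD_eq_getElem l 0 hf1]
      simp only [Bool.and_eq_true, beq_iff_eq]
      constructor
      · rw [hfv, hf1v]
      · rw [hfv]
        exact_mod_cast hcnt2
    · rw [List.getD_eq_getElem l 0 hflt, List.getD_eq_getElem l 0 hjlt, hfv]
  · -- j = f : the pair sits at (j, j+1)
    have hjf : j = f := by omega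
    subst hjf
    left
    unfold pvPredB
    rw [List.getD_eq_getElem l 0 hjlt, List.getD_eq_getElem l 0 hj]
    simp only [Bool.and_eq_true, beq_iff_eq]
    constructor
    · rw [← hfv] at hf1v; exact hf1v.symm
    · exact_mod_cast hcnt2

lemma pv_scan_of_pred (l : List Int) (p : Nat → Bool) (k : Nat) (h : p k = true) :
    pvScan l p k = l.getD k 0 := by
  cases k <;> simp [pvScan, h]

lemma pv_scan_eq (l : List Int) : ∀ k : Nat, k + 1 < l.length →
    pvScan l (pvPredA l) k = pvScan l (pvPredB l) k := by
  intro k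
  induction k with
  | zero =>
    intro hk
    by_cases hB : pvPredB l 0 = true
    · have hA := pv_fact_i l 0 hk hB
      simp [pvScan, hA, hB]
    · have hA : pvPredA l 0 ≠ true := by
        intro hA
        rcases pv_fact_ii l 0 hk hA with h | ⟨j', hj', -, -⟩
        · exact hB h
        · omega
      simp [pvScan, hA, hB]
  | succ k ih =>
    intro hk
    by_cases hB : pvPredB l (k + 1) = true
    · have hA := pv_fact_i l (k + 1) hk hB
      simp [pvScan, hA, hB]
    · by_cases hA : pvPredA l (k + 1) = true
      · rcases pv_fact_ii l (k + 1) hk hA with h | ⟨j', hj', hBj', hval⟩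
        · exact absurd h hB
        · have hjk : k = j' := by omega
          subst hjk
          simp only [pvScan, hA, hB, if_true, Bool.false_eq_true, if_false]
          rw [pv_scan_of_pred l (pvPredB l) k hBj', hval]
      · simp only [pvScan, hA, hB]
        exact ih (by omega)

lemma pv_foldl_counter (l : List Int) : ∀ (t : List Int) (m : Nat) (r : Int),
    (t.foldl (fun (st : Int × Int) (i : Int) =>
        if st.1 < (l.length : Int) - 1 then
          if pvCondA l i then (st.1 + 1, i) else (st.1 + 1, st.2)
        else st) ((m : Int), r)).2
      = (t.take (l.length - 1 - m)).foldl (fun r i => if pvCondA l i then i else r) r := by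
  intro t
  induction t with
  | nil => intro m r; simp
  | cons x t ih =>
    intro m r
    by_cases hm : (m : Int) < (l.length : Int) - 1
    · have hm' : m + 1 ≤ l.length - 1 := by omega
      have htake : l.length - 1 - m = (l.length - 1 - (m + 1)) + 1 := by omega
      rw [htake]
      simp only [List.foldl_cons, List.take_succ_cons, hm, if_true]
      by_cases hc : pvCondA l x = true
      · simp only [hc, if_true]
        rw [show ((m : Int) + 1) = (((m + 1 : Nat)) : Int) from by push_cast; ring]
        exact ih (m + 1) x
      · simp only [hc]
        rw [show ((m : Int) + 1) = (((m + 1 : Nat)) : Int) from by push_cast; ring]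
        exact ih (m + 1) r
    · have hm' : l.length - 1 - m = 0 := by omega
      rw [hm']
      simp only [List.foldl_cons, hm, if_false, List.take_zero, List.foldl_nil]
      have := ih m r
      rw [hm'] at this
      simpa using this

lemma pv_prefix_scan (l : List Int) : ∀ k : Nat, k < l.length →
    ((l.take (k + 1)).foldl (fun r i => if pvCondA l i then i else r) (-1)) = pvScan l (pvPredA l) k := by
  intro k
  induction k with
  | zero =>
    intro hk
    rw [List.take_add_one, List.take_zero, List.getElem?_eq_getElem hk]
    simp [pvScan, pvPredA, List.getD_eq_getElem?_getD, List.getElem?_eq_getElem hk]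
  | succ k ih =>
    intro hk
    rw [List.take_add_one, List.getElem?_eq_getElem hk, List.foldl_append]
    simp only [Option.toList_some, List.foldl_cons, List.foldl_nil]
    rw [ih (by omega)]
    simp [pvScan, pvPredA, List.getD_eq_getElem?_getD, List.getElem?_eq_getElem hk]

lemma pv_alt_eq_scan (l : List Int) (k : Nat) :
    pvAltScan l (l.foldl (fun (d : PySem.Dict Int Int) x => d.insert x (d.getD x 0 + 1)) PySem.Dict.empty) k
      = pvScan l (pvPredB l) k := by
  have hemp : ∀ v : Int, (PySem.Dict.empty : PySem.Dict Int Int).getD v 0 = 0 := fun _ => rfl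
  induction k with
  | zero =>
    simp only [pvAltScan, pvScan, pvPredB, PySem.Dict.getD_foldl_insert_add_one, hemp, zero_add]
  | succ k ih =>
    simp only [pvAltScan, pvScan, pvPredB, PySem.Dict.getD_foldl_insert_add_one, hemp, zero_add, ih]
    rfl

-- ===== VERDICT (by name: the statement is the Claim_ definition above) =====
theorem buscar_elementos_iguales_seguidos_spec : Claim_equal_buscar_elementos_iguales_seguidos := by
  intro lista _
  unfold Spec_buscar_elementos_iguales_seguidos
  unfold buscar_elementos_iguales_seguidos buscar_elementos_iguales_seguidos_alt
  have hfold := pv_foldl_counter lista lista 0 (-1)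
  simp only [Nat.cast_zero, Nat.sub_zero] at hfold
  rw [hfold]
  by_cases hlen : 2 ≤ lista.length
  · have h1 : lista.length - 1 = (lista.length - 2) + 1 := by omega
    rw [h1, pv_prefix_scan lista (lista.length - 2) (by omega),
      pv_scan_eq lista (lista.length - 2) (by omega), if_pos hlen, pv_alt_eq_scan]
  · have h1 : lista.length - 1 = 0 := by omega
    rw [h1, List.take_zero, List.foldl_nil, if_neg hlen]
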